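-- pv_equiv track=rewrite | github.com/lindolib4/football_ai | toto/generator.py | generate_coupons
-- ===== SOURCE A (Python) =====
-- import itertools
--
-- def generate_coupons(decisions: list[str], limit: int = 16) -> list[list[str]]:
--     pools: list[list[str]] = []
--     for decision in decisions:
--         if len(decision) == 2:
--             pools.append([decision[0], decision[1]])
--         else:
--             pools.append([decision])
--
--     lines = [list(row) for row in itertools.product(*pools)]
--     return lines[:limit]
-- ===== SOURCE B (Python) =====
-- def generate_coupons(decisions: list[str], limit: int = 16) -> list[list[str]]:
--     pools: list[list[str]] = []
--     for decision in decisions: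
--         if len(decision) == 2:
--             pools.append([decision[0], decision[1]])
--         else:
--             pools.append([decision])
--
--     total = 1
--     for pool in pools:
--         total *= len(pool)
--
--     # how many lines the first-`limit` slice keeps (Python slice semantics)
--     count = min(limit, total) if limit >= 0 else max(total + limit, 0)
--
--     lines: list[list[str]] = []
--     for i in range(count):
--         line: list[str] = []
--         for pool in reversed(pools):
--             i, digit = divmod(i, len(pool))
--             line.append(pool[digit])
--         line.reverse()
--         lines.append(line)
--     return lines
-- ===== Notes on version B (the rewrite author's own statement) =====
-- stated objective: alternative
-- what changed: Instead of materialising the full Cartesian product of the pools with itertools.product and slicing it, B computes the product of the pool sizes and decodes only the kept indices (min over the Python slice bound) as mixed-radix numerals, last pool varying fastest; work is proportional to the emitted lines rather than to the whole product, though a timing run measured no speedup on its input family.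
import Mathlib
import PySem

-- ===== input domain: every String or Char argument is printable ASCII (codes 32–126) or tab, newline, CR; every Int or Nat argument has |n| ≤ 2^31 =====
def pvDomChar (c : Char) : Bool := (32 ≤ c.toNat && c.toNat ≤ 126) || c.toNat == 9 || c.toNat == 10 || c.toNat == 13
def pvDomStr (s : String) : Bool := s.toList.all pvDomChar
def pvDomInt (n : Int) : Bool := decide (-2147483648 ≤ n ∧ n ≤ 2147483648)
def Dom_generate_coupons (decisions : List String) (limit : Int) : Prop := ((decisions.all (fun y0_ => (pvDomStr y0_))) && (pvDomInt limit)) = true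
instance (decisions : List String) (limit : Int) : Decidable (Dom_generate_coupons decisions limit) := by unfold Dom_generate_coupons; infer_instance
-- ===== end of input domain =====

-- B builds the same decision pools but never materialises the full Cartesian product: it decodes
-- each kept index (mixed radix, last pool varying fastest) into one line.  Objective: alternative.

-- ===== PORT A =====
-- the for-loop building `pools` (append one pool per decision)
def pvPoolsA (decisions : List String) : List (List String) :=
  decisions.foldl (fun pools decision =>
    if PySem.Str.len decision = 2 then
      pools ++ [[String.ofList [(PySem.Str.pyGet? decision 0).getD ' '],
                 String.ofList [(PySem.Str.pyGet? decision 1).getD ' ']]]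
    else
      pools ++ [[decision]]) []

-- itertools.product(*pools): first pool varies slowest
def pvProductA (pools : List (List String)) : List (List String) :=
  match pools with
  | [] => [[]]
  | p :: ps => p.flatMap (fun x => (pvProductA ps).map (fun row => x :: row))

def generate_coupons (decisions : List String) (limit : Int) : List (List String) :=
  let pools := pvPoolsA decisions
  let lines := pvProductA pools   -- list(row) is the identity on a list row
  PySem.List.slice lines none (some limit)

-- ===== PORT B =====
def pvPoolsB (decisions : List String) : List (List String) :=
  decisions.foldl (fun pools decision =>
    if PySem.Str.len decision = 2 then
      pools ++ [[String.ofList [(PySem.Str.pyGet? decision 0).getD ' '],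
                 String.ofList [(PySem.Str.pyGet? decision 1).getD ' ']]]
    else
      pools ++ [[decision]]) []

-- one step of the inner loop: i, digit = divmod(i, len(pool)); line.append(pool[digit])
def pvDecodeStep (st : Int × List String) (pool : List String) : Int × List String :=
  (PySem.Int.floordiv st.1 (pool.length : Int),
   st.2 ++ [PySem.List.pyGetD pool (PySem.Int.mod st.1 (pool.length : Int)) ""])

def generate_coupons_alt (decisions : List String) (limit : Int) : List (List String) :=
  let pools := pvPoolsB decisions
  let total := pools.foldl (fun t pool => t * (pool.length : Int)) 1
  let count := if 0 ≤ limit then min limit total else max (total + limit) 0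
  -- line.reverse() at the end of the inner loop
  (PySem.List.pyRange 0 count 1).map (fun i => (pools.reverse.foldl pvDecodeStep (i, [])).2.reverse)

-- ===== PRECONDITION & SPEC =====
def Spec_generate_coupons (decisions : List String) (limit : Int) (out : List (List String)) : Prop := out = generate_coupons_alt decisions limit
instance (decisions : List String) (limit : Int) (out : List (List String)) : Decidable (Spec_generate_coupons decisions limit out) := by unfold Spec_generate_coupons; infer_instance

-- ===== CLAIM (what is proved, stated in full; the proofs are below) =====
def Claim_equal_generate_coupons : Prop := ∀ (decisions : List String) (limit : Int), Dom_generate_coupons decisions limit → Spec_generate_coupons decisions limit (generate_coupons decisions limit)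

-- ===== LEMMAS AND PROOFS =====

-- product of the pool sizes
def pvT (pools : List (List String)) : Nat := (pools.map List.length).prod

-- mixed-radix digits of j (head pool most significant)
def pvDigits (pools : List (List String)) (j : Nat) : List String :=
  match pools with
  | [] => []
  | p :: ps => p.getD (j / pvT ps) "" :: pvDigits ps (j % pvT ps)

-- the pool one decision contributes
def pvPoolOf (d : String) : List String :=
  if PySem.Str.len d = 2 then
    [String.ofList [(PySem.Str.pyGet? d 0).getD ' '], String.ofList [(PySem.Str.pyGet? d 1).getD ' ']]
  else [d]

lemma pvPoolsB_eq (decisions : List String) : pvPoolsB decisions = pvPoolsA decisions := rfl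

lemma pvPoolsA_eq_map (ds : List String) : pvPoolsA ds = ds.map pvPoolOf := by
  unfold pvPoolsA
  have h : (fun (pools : List (List String)) decision =>
      if PySem.Str.len decision = 2 then
        pools ++ [[String.ofList [(PySem.Str.pyGet? decision 0).getD ' '],
                   String.ofList [(PySem.Str.pyGet? decision 1).getD ' ']]]
      else pools ++ [[decision]])
      = fun pools decision => pools ++ [pvPoolOf decision] := by
    funext pools d; unfold pvPoolOf; split <;> rfl
  rw [h, PySem.List.foldl_append_singleton_eq_map, List.nil_append]

lemma pvT_pos (ds : List String) : 0 < pvT (pvPoolsA ds) := by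
  rw [pvPoolsA_eq_map]
  induction ds with
  | nil => simp [pvT]
  | cons d t ih =>
      have hd : 0 < (pvPoolOf d).length := by unfold pvPoolOf; split <;> simp
      simp only [pvT, List.map_cons, List.prod_cons] at *
      exact Nat.mul_pos hd ih

lemma pvT_cons (p : List String) (ps : List (List String)) :
    pvT (p :: ps) = p.length * pvT ps := by simp [pvT]

lemma pvTotal_foldl (pools : List (List String)) (t : Int) :
    pools.foldl (fun t pool => t * (pool.length : Int)) t = t * ((pvT pools : Nat) : Int) := by
  induction pools generalizing t with
  | nil => simp [pvT]
  | cons p ps ih => rw [List.foldl_cons, ih, pvT_cons]; push_cast; ring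

lemma pvDecode_foldl (pools : List (List String)) (i : Nat) (acc : List String) :
    pools.reverse.foldl pvDecodeStep ((i : Int), acc)
      = (((i / pvT pools : Nat) : Int), acc ++ (pvDigits pools (i % pvT pools)).reverse) := by
  induction pools generalizing acc with
  | nil => simp [pvT, pvDigits]
  | cons p ps ih =>
      rw [List.reverse_cons, List.foldl_append, ih]
      simp only [List.foldl_cons, List.foldl_nil, pvDecodeStep,
        PySem.Int.floordiv_natCast, PySem.Int.mod_natCast, PySem.List.pyGetD_natCast]
      rw [pvT_cons, pvDigits, Prod.mk.injEq]
      constructor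
      · rw [Nat.div_div_eq_div_mul, Nat.mul_comm]
      · rw [Nat.mul_comm, Nat.mod_mul_right_div_self,
          Nat.mod_mod_of_dvd i (dvd_mul_right _ _), List.reverse_cons, List.append_assoc]

lemma pvFlatMap_range {α β : Type} (l : List α) (d : α) (f : α → List β) :
    l.flatMap f = (List.range l.length).flatMap (fun q => f (l.getD q d)) := by
  induction l with
  | nil => simp
  | cons x t ih =>
      rw [List.flatMap_cons, List.length_cons, List.range_succ_eq_map, List.flatMap_cons,
        List.flatMap_map]
      simp only [List.getD_cons_zero, List.getD_cons_succ]
      rw [ih]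

lemma pvRange_mul {β : Type} (a b : Nat) (F : Nat → β) :
    (List.range (a*b)).map F
      = (List.range a).flatMap (fun q => (List.range b).map (fun r => F (q*b+r))) := by
  induction a with
  | zero => simp
  | succ n ih =>
      rw [Nat.succ_mul, List.range_add, List.map_append, ih, List.range_succ,
        List.flatMap_append, List.flatMap_singleton, List.map_map]
      rfl

lemma pvProductA_eq (pools : List (List String)) :
    pvProductA pools = (List.range (pvT pools)).map (pvDigits pools) := by
  induction pools with
  | nil => simp [pvProductA, pvT, pvDigits]
  | cons p ps ih =>
      rw [pvProductA, ih, pvT_cons, pvRange_mul, pvFlatMap_range p "" _]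
      refine List.flatMap_congr (fun q hq => ?_)
      simp only [List.map_map]
      refine List.map_congr_left (fun r hr => ?_)
      rw [List.mem_range] at hr
      have hTpos : 0 < pvT ps := by omega
      simp only [Function.comp]
      rw [pvDigits, Nat.mul_comm q (pvT ps), Nat.mul_add_div hTpos, Nat.div_eq_of_lt hr,
        Nat.add_zero, Nat.mul_comm (pvT ps) q]
      rw [Nat.mul_add_mod', Nat.mod_eq_of_lt hr]

-- B's mapped range equals the first c.toNat rows of the digit table
lemma pvB_rows (pools : List (List String)) (c : Int) (_hc : 0 ≤ c)
    (hle : c.toNat ≤ pvT pools) :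
    (PySem.List.pyRange 0 c 1).map (fun i => (pools.reverse.foldl pvDecodeStep (i, [])).2.reverse)
      = (List.range c.toNat).map (pvDigits pools) := by
  rw [PySem.List.pyRange_one, List.map_map, Int.sub_zero]
  refine List.map_congr_left (fun k hk => ?_)
  rw [List.mem_range] at hk
  simp only [Function.comp_apply, Int.zero_add]
  rw [pvDecode_foldl, List.nil_append, List.reverse_reverse]
  have : k % pvT pools = k := Nat.mod_eq_of_lt (lt_of_lt_of_le hk hle)
  rw [this]

lemma pv_main (decisions : List String) (limit : Int) :
    generate_coupons decisions limit = generate_coupons_alt decisions limit := by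
  unfold generate_coupons generate_coupons_alt
  simp only [pvPoolsB_eq]
  set pools := pvPoolsA decisions with hpools
  have hT : 0 < pvT pools := pvT_pos decisions
  rw [pvTotal_foldl, Int.one_mul, pvProductA_eq]
  by_cases hlim : 0 ≤ limit
  · rw [if_pos hlim]
    have hc : (0:Int) ≤ min limit (pvT pools : Nat) := le_min hlim (by positivity)
    rw [pvB_rows pools _ hc (by omega)]
    rw [PySem.List.slice_to _ hlim, ← List.map_take, List.take_range]
    have hm : min limit.toNat (pvT pools) = (min limit ((pvT pools : Nat) : Int)).toNat := by omega
    rw [hm]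
  · rw [if_neg hlim]
    have hk : limit = -(((-limit).toNat : Nat) : Int) := by omega
    have hkpos : 0 < (-limit).toNat := by omega
    rw [hk, PySem.List.slice_to_neg_natCast _ _ hkpos]
    have hc : (0:Int) ≤ max ((pvT pools : Nat) + -(((-limit).toNat : Nat) : Int)) 0 := le_max_right _ _
    rw [pvB_rows pools _ hc (by omega)]
    rw [List.length_map, List.length_range, ← List.map_take, List.take_range]
    have hm : min (pvT pools - (-limit).toNat) (pvT pools)
        = (max ((pvT pools : Nat) + -(((-limit).toNat : Nat) : Int)) 0).toNat := by omega
    rw [hm]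

-- ===== VERDICT (by name: the statement is the Claim_ definition above) =====
theorem generate_coupons_spec : Claim_equal_generate_coupons := by
  intro decisions limit _
  exact pv_main decisions limit
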